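-- pv_equiv track=rewrite | github.com/PicoPlanetDev/computational-math | unit-2/unitTwoQuiz.py | sumOfFirstMIntegersDivisibleByN
-- ===== SOURCE A (Python) =====
-- def sumOfFirstMIntegersDivisibleByN(m,n):
--     total = 0
--     count = 0
--     num = 0
--     while count <= m:
--         if num%n==0:
--             total += num
--             count += 1
--         num += n
--     return total
-- ===== SOURCE B (Python) =====
-- def sumOfFirstMIntegersDivisibleByN(m, n):
--     # closed-form arithmetic series: 0 + n + 2n + ... + m*n
--     if m >= 0:
--         return n * m * (m + 1) // 2
--     return 0
-- ===== Notes on version B (the rewrite author's own statement) =====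
-- stated objective: faster
-- what changed: replaced the O(m) accumulation loop over successive multiples of n with the closed-form arithmetic-series formula n*m*(m+1)//2
import Mathlib
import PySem

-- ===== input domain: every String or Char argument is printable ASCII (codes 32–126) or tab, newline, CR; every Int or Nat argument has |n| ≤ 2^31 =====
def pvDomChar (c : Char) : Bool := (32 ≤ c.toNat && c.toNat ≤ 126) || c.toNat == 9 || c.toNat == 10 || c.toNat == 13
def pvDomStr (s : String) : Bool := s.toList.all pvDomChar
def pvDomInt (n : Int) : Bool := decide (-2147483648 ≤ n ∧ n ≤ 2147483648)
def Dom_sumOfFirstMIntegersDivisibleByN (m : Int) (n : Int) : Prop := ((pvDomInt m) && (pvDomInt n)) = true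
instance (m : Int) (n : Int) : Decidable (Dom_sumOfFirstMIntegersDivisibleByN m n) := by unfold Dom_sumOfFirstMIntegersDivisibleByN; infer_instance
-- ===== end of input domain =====

-- B replaces A's O(m) accumulation loop with the closed-form arithmetic-series formula (objective: faster).

-- ===== PORT A =====
-- The while loop, with fuel (on Pre_ the condition num % n == 0 always fires, so
-- (m+1).toNat iterations are exactly enough; the fuel only makes the recursion total).
def pvLoopA (fuel : Nat) (m n total count num : Int) : Int :=
  match fuel with
  | 0 => total
  | f + 1 =>
    if count ≤ m then
      if PySem.Int.mod num n = 0 then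
        pvLoopA f m n (total + num) (count + 1) (num + n)
      else
        pvLoopA f m n total count (num + n)
    else total

def sumOfFirstMIntegersDivisibleByN (m : Int) (n : Int) : Int :=
  pvLoopA (m + 1).toNat m n 0 0 0

-- ===== PORT B =====
def sumOfFirstMIntegersDivisibleByN_alt (m : Int) (n : Int) : Int :=
  if m ≥ 0 then PySem.Int.floordiv (n * m * (m + 1)) 2 else 0

-- ===== PRECONDITION & SPEC =====
-- Pre_ excludes exactly the inputs where A raises ZeroDivisionError: n == 0 with m >= 0
-- (for m < 0 the loop body never runs and A returns 0 even with n == 0).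
def Pre_sumOfFirstMIntegersDivisibleByN (m : Int) (n : Int) : Prop := ¬ (n = 0 ∧ 0 ≤ m)
instance (m : Int) (n : Int) : Decidable (Pre_sumOfFirstMIntegersDivisibleByN m n) := by unfold Pre_sumOfFirstMIntegersDivisibleByN; infer_instance
def pvWitness_sumOfFirstMIntegersDivisibleByN : Int × Int := (5, 3)

def Spec_sumOfFirstMIntegersDivisibleByN (m : Int) (n : Int) (out : Int) : Prop := out = sumOfFirstMIntegersDivisibleByN_alt m n
instance (m : Int) (n : Int) (out : Int) : Decidable (Spec_sumOfFirstMIntegersDivisibleByN m n out) := by unfold Spec_sumOfFirstMIntegersDivisibleByN; infer_instance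

-- ===== CLAIM (what is proved, stated in full; the proofs are below) =====
def Claim_equal_sumOfFirstMIntegersDivisibleByN : Prop := ∀ (m : Int) (n : Int), Dom_sumOfFirstMIntegersDivisibleByN m n → Pre_sumOfFirstMIntegersDivisibleByN m n → Spec_sumOfFirstMIntegersDivisibleByN m n (sumOfFirstMIntegersDivisibleByN m n)

-- ===== LEMMAS AND PROOFS =====

-- Loop invariant: starting from num = count * n, doubled result is total*2 plus
-- n * ((m+count)*(m-count+1)) (the doubled arithmetic series from count to m).
lemma pvLoopA_closed (f : Nat) : ∀ (m n total count : Int), n ≠ 0 → count ≤ m + 1 →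
    m + 1 - count ≤ (f : Int) →
    2 * pvLoopA f m n total count (count * n) = 2 * total + n * ((m + count) * (m - count + 1)) := by
  induction f with
  | zero =>
    intro m n total count hn h1 h2
    have : count = m + 1 := by omega
    subst this
    simp only [pvLoopA]; ring
  | succ f ih =>
    intro m n total count hn h1 h2
    by_cases hc : count ≤ m
    · have hmod : PySem.Int.mod (count * n) n = 0 :=
        (PySem.Int.mod_eq_zero_iff_dvd _ _).mpr ⟨count, by ring⟩
      have step : count * n + n = (count + 1) * n := by ring
      have := ih m n (total + count * n) (count + 1) hn (by omega) (by omega)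
      simp only [pvLoopA, if_pos hc, hmod, step, if_true] at *
      rw [this]; ring
    · have : count = m + 1 := by omega
      subst this
      simp only [pvLoopA, if_neg hc]; ring

lemma pvFdiv_double (x : Int) : PySem.Int.floordiv (2 * x) 2 = x := by
  rw [PySem.Int.floordiv_eq_ediv_of_pos (by norm_num)]
  omega

-- ===== VERDICT (by name: the statement is the Claim_ definition above) =====
theorem sumOfFirstMIntegersDivisibleByN_spec : Claim_equal_sumOfFirstMIntegersDivisibleByN := by
  intro m n _ hpre
  unfold Spec_sumOfFirstMIntegersDivisibleByN sumOfFirstMIntegersDivisibleByN sumOfFirstMIntegersDivisibleByN_alt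
  by_cases hm : 0 ≤ m
  · have hn : n ≠ 0 := by
      intro h; exact hpre ⟨h, hm⟩
    have hfuel : (m + 1).toNat = m + 1 := by omega
    have key := pvLoopA_closed (m + 1).toNat m n 0 0 hn (by omega) (by omega)
    simp only [zero_mul, mul_zero, add_zero] at key
    have key2 : 2 * pvLoopA (m + 1).toNat m n 0 0 0 = n * m * (m + 1) := by rw [key]; ring
    rw [if_pos hm, ← key2, pvFdiv_double]
  · have : (m + 1).toNat = 0 ∨ ((m + 1).toNat = 1 ∧ m = 0) := by omega
    rcases this with h | ⟨h, _⟩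
    · rw [h, if_neg hm]; rfl
    · omega
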